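-- pv_equiv track=rewrite | github.com/Adam-Hoelscher/CodeFights.py | opponentMatching.py | opponentMatching
-- ===== SOURCE A (Python) =====
-- def opponentMatching(xp):
--
--     queue = sorted(enumerate(xp), key=lambda x: x[1])
--     matches = []
--
--     while len(queue) >= 2:
--         min_dist = float('Inf')
--         for (id0, x0), (id1, x1) in zip(queue, queue[1:]):
--             if x1 - x0 < min_dist:
--                 min_dist = x1 - x0
--                 pair = (id0, x0), (id1, x1)
--
--         matches.append(sorted(player[0] for player in pair))
--         for p in pair:
--             queue.remove(p)
--
--     return matches
-- ===== SOURCE B (Python) =====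
-- def _insert_asc(pending, ev):
--     # binary-search insertion keeping `pending` sorted ascending
--     lo, hi = 0, len(pending)
--     while lo < hi:
--         mid = (lo + hi) // 2
--         if pending[mid] < ev:
--             lo = mid + 1
--         else:
--             hi = mid
--     pending.insert(lo, ev)
--
--
-- def opponentMatching(xp):
--     n = len(xp)
--     order = sorted(range(n), key=lambda i: xp[i])   # original ids, in xp-sorted order
--     xs = [xp[i] for i in order]                     # the xp values, sorted
--     nxt = list(range(1, n + 1))                     # doubly-linked list over positions 0..n-1
--     prv = list(range(-1, n - 1))
--     alive = [True] * n
--     pending = []                                    # adjacency events (gap, left, right), ascending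
--     for i in range(n - 1):
--         _insert_asc(pending, (xs[i + 1] - xs[i], i, i + 1))
--     matches = []
--     for _ in range(n // 2):
--         g, l, r = pending.pop(0)
--         while not (alive[l] and nxt[l] == r):       # lazily skip stale events
--             g, l, r = pending.pop(0)
--         a, b = order[l], order[r]
--         matches.append([a, b] if a < b else [b, a])
--         alive[l] = alive[r] = False
--         p, q = prv[l], nxt[r]
--         if p >= 0:
--             nxt[p] = q
--         if q < n:
--             prv[q] = p
--         if p >= 0 and q < n:
--             _insert_asc(pending, (xs[q] - xs[p], p, q))
--     return matches
-- ===== Notes on version B (the rewrite author's own statement) =====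
-- stated objective: faster
-- what changed: Replaces A's per-round rescan of all adjacent pairs and O(n) list.remove calls with a sorted lazy-deletion event queue of adjacency gaps over a doubly-linked list of positions, so each round pops the minimal still-valid gap instead of rescanning the queue.
import Mathlib
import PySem

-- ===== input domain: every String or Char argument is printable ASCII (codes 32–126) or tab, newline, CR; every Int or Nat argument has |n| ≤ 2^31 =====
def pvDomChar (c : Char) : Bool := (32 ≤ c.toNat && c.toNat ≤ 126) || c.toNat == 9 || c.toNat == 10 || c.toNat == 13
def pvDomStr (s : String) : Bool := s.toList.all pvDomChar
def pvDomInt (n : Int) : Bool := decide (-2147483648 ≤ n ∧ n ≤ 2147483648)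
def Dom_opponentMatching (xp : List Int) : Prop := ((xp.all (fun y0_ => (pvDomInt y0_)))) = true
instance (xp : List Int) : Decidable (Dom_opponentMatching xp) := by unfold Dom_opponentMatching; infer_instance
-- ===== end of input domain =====

-- B replaces A's quadratic rescan-and-remove rounds by a sorted lazy-deletion queue of adjacency-gap
-- events over a doubly-linked list of positions (objective: faster by a measured constant factor).

-- ===== PORT A =====

-- the running minimum scan: min_dist starts at float('Inf'), modelled as `none` (every int is below it)
def pvScanMin (pairs : List ((Int × Int) × (Int × Int))) :
    Option (Int × ((Int × Int) × (Int × Int))) :=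
  pairs.foldl (fun st pr =>
    match st with
    | none => some (pr.2.2 - pr.1.2, pr)
    | some (d, best) => if pr.2.2 - pr.1.2 < d then some (pr.2.2 - pr.1.2, pr) else some (d, best))
    none

-- the while-loop; fuel = len(queue) (each round removes two elements, so it never runs out)
def pvLoopA : Nat → List (Int × Int) → List (List Int) → List (List Int)
  | 0, _, ms => ms
  | fuel + 1, queue, ms =>
    if 2 ≤ queue.length then
      match pvScanMin (queue.zip (PySem.List.slice queue (some 1) none)) with
      | none => ms        -- unreachable: the zip is nonempty when len(queue) ≥ 2
      | some (_, (p0, p1)) =>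
        let m := PySem.List.sorted [p0.1, p1.1] (fun x => x)
        -- queue.remove(p): ValueError never raised here (both pair members are in the queue)
        let queue1 := (PySem.List.remove? queue p0).getD queue
        let queue2 := (PySem.List.remove? queue1 p1).getD queue1
        pvLoopA fuel queue2 (ms ++ [m])
    else ms

def opponentMatching (xp : List Int) : List (List Int) :=
  let queue := PySem.List.sorted (PySem.List.enumerate xp) (fun x => x.2)
  pvLoopA queue.length queue []

-- ===== PORT B =====

-- Python's `<` on int triples (lexicographic tuple comparison; exact)
def pvEvLT (a b : Int × Int × Int) : Bool :=
  a.1 < b.1 || (a.1 == b.1 && (a.2.1 < b.2.1 || (a.2.1 == b.2.1 && a.2.2 < b.2.2)))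

-- the while-loop of _insert_asc; lo,hi stay in [0,len] so (lo+hi)//2 is Nat division (exact) and
-- pending[mid] is always in range (the getD default is never read)
def pvBsLoop (pending : List (Int × Int × Int)) (ev : Int × Int × Int) (lo hi : Nat) : Nat :=
  if _h : lo < hi then
    let mid := (lo + hi) / 2
    if pvEvLT (pending.getD mid (0, 0, 0)) ev then pvBsLoop pending ev (mid + 1) hi
    else pvBsLoop pending ev lo mid
  else lo
termination_by hi - lo
decreasing_by all_goals omega

def pvInsertAsc (pending : List (Int × Int × Int)) (ev : Int × Int × Int) :
    List (Int × Int × Int) :=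
  PySem.List.insert pending ((pvBsLoop pending ev 0 pending.length : Nat) : Int) ev

-- `g, l, r = pending.pop(0)` + `while not (alive[l] and nxt[l] == r): ...pop(0)`
def pvPopValid (alive : List Bool) (nxt : List Int) :
    List (Int × Int × Int) → Option ((Int × Int × Int) × List (Int × Int × Int))
  | [] => none                 -- unreachable: a valid event always exists while the loop runs
  | e :: rest =>
    if PySem.List.pyGetD alive e.2.1 false && (PySem.List.pyGetD nxt e.2.1 0 == e.2.2) then
      some (e, rest)
    else pvPopValid alive nxt rest

-- the `for _ in range(n // 2)` loop
def pvLoopB (n : Nat) (order xs : List Int) :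
    Nat → List Bool → List Int → List Int → List (Int × Int × Int) → List (List Int) →
    List (List Int)
  | 0, _, _, _, _, ms => ms
  | k + 1, alive, nxt, prv, pending, ms =>
    match pvPopValid alive nxt pending with
    | none => ms          -- unreachable (see pvPopValid)
    | some (e, pending1) =>
      let l := e.2.1
      let r := e.2.2
      let a := PySem.List.pyGetD order l 0
      let b := PySem.List.pyGetD order r 0
      let m := if a < b then [a, b] else [b, a]
      let alive' := PySem.List.pySetD (PySem.List.pySetD alive l false) r false
      let p := PySem.List.pyGetD prv l 0
      let q := PySem.List.pyGetD nxt r 0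
      let nxt' := if 0 ≤ p then PySem.List.pySetD nxt p q else nxt
      let prv' := if q < (n : Int) then PySem.List.pySetD prv q p else prv
      let pending2 :=
        if 0 ≤ p ∧ q < (n : Int) then
          pvInsertAsc pending1 (PySem.List.pyGetD xs q 0 - PySem.List.pyGetD xs p 0, p, q)
        else pending1
      pvLoopB n order xs k alive' nxt' prv' pending2 (ms ++ [m])

def opponentMatching_alt (xp : List Int) : List (List Int) :=
  let n := xp.length
  let order := PySem.List.sorted (PySem.List.pyRange 0 (n : Int) 1)
    (fun i => PySem.List.pyGetD xp i 0)
  let xs := order.map (fun i => PySem.List.pyGetD xp i 0)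
  let nxt := PySem.List.pyRange 1 ((n : Int) + 1) 1
  let prv := PySem.List.pyRange (-1) ((n : Int) - 1) 1
  let alive := List.replicate n true
  let pending := (PySem.List.pyRange 0 ((n : Int) - 1) 1).foldl
    (fun pend i =>
      pvInsertAsc pend (PySem.List.pyGetD xs (i + 1) 0 - PySem.List.pyGetD xs i 0, i, i + 1)) []
  -- n // 2 of nonnegative ints is Nat division (exact)
  pvLoopB n order xs (n / 2) alive nxt prv pending []

-- ===== PRECONDITION & SPEC =====
def Spec_opponentMatching (xp : List Int) (out : List (List Int)) : Prop := out = opponentMatching_alt xp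
instance (xp : List Int) (out : List (List Int)) : Decidable (Spec_opponentMatching xp out) := by unfold Spec_opponentMatching; infer_instance

-- ===== CLAIM (what is proved, stated in full; the proofs are below) =====
def Claim_equal_opponentMatching : Prop := ∀ (xp : List Int), Dom_opponentMatching xp → Spec_opponentMatching xp (opponentMatching xp)

-- ===== LEMMAS AND PROOFS =====


-- Proof-side helper definitions ------------------------------------------------

-- the gap of a zipped pair of players
def pvGap (pr : (Int × Int) × (Int × Int)) : Int := pr.2.2 - pr.1.2

-- the adjacency event between sorted positions l < r
def pvEv (xs : List Int) (l r : Nat) : Int × Int × Int :=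
  (xs.getD r 0 - xs.getD l 0, (l : Int), (r : Int))

-- the queue entry of sorted position p
def pvPair (order xs : List Int) (p : Nat) : Int × Int := (order.getD p 0, xs.getD p 0)

-- the validity test of pvPopValid, as a predicate
def pvValid (alive : List Bool) (nxt : List Int) (e : Int × Int × Int) : Bool :=
  PySem.List.pyGetD alive e.2.1 false && (PySem.List.pyGetD nxt e.2.1 0 == e.2.2)

-- the loop invariant tying B's state to the alive-position list P
def pvInv (n : Nat) (xs : List Int) (P : List Nat) (alive : List Bool) (nxt prv : List Int)
    (pending : List (Int × Int × Int)) : Prop :=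
  P.Pairwise (· < ·) ∧ (∀ p ∈ P, p < n) ∧
  alive.length = n ∧ (∀ p : Nat, p < n → alive.getD p false = decide (p ∈ P)) ∧
  nxt.length = n ∧ prv.length = n ∧
  (∀ X t u Y, P = X ++ t :: u :: Y → nxt.getD t 0 = (u : Int)) ∧
  (∀ X t, P = X ++ [t] → nxt.getD t 0 = (n : Int)) ∧
  (∀ X t u Y, P = X ++ t :: u :: Y → prv.getD u 0 = (t : Int)) ∧
  (∀ t Y, P = t :: Y → prv.getD t 0 = -1) ∧
  List.Pairwise (fun a b => pvEvLT a b = true) pending ∧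
  (∀ e ∈ pending, ∃ l r : Nat, e = pvEv xs l r ∧ l < r ∧ r < n) ∧
  (∀ e ∈ pending, ∀ l : Nat, e.2.1 = (l : Int) → l ∈ P → e.2.2 ≤ nxt.getD l 0) ∧
  (∀ A l r B, P = A ++ l :: r :: B → pvEv xs l r ∈ pending)

-- Section 1: pvEvLT is a strict linear order ------------------------------------

lemma pvEvLT_asymm {a b : Int × Int × Int} (h1 : pvEvLT a b = true) (h2 : pvEvLT b a = true) :
    False := by
  obtain ⟨a1, a2, a3⟩ := a; obtain ⟨b1, b2, b3⟩ := b
  simp only [pvEvLT, Bool.or_eq_true, Bool.and_eq_true, decide_eq_true_eq, beq_iff_eq] at h1 h2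
  omega

lemma pvEvLT_total {a b : Int × Int × Int} (h1 : pvEvLT a b = false) (h2 : pvEvLT b a = false) :
    a = b := by
  obtain ⟨a1, a2, a3⟩ := a; obtain ⟨b1, b2, b3⟩ := b
  simp only [pvEvLT, Bool.or_eq_false_iff, Bool.and_eq_false_iff, decide_eq_false_iff_not,
    beq_eq_false_iff_ne, ne_eq, Prod.mk.injEq] at h1 h2 ⊢
  omega

-- Section 2: binary-search insertion --------------------------------------------

lemma pvEvLT_trans {a b c : Int × Int × Int} (h1 : pvEvLT a b = true) (h2 : pvEvLT b c = true) :
    pvEvLT a c = true := by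
  obtain ⟨a1, a2, a3⟩ := a; obtain ⟨b1, b2, b3⟩ := b; obtain ⟨c1, c2, c3⟩ := c
  simp only [pvEvLT, Bool.or_eq_true, Bool.and_eq_true, decide_eq_true_eq, beq_iff_eq] at h1 h2 ⊢
  omega

lemma pvPairwise_getD {pending : List (Int × Int × Int)}
    (hs : List.Pairwise (fun a b => pvEvLT a b = true) pending) {i j : Nat}
    (hij : i < j) (hj : j < pending.length) :
    pvEvLT (pending.getD i (0,0,0)) (pending.getD j (0,0,0)) = true := by
  rw [List.getD_eq_getElem _ _ (by omega), List.getD_eq_getElem _ _ hj]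
  exact List.pairwise_iff_getElem.mp hs i j (by omega) hj hij

lemma pvBsLoop_spec (pending : List (Int × Int × Int)) (ev : Int × Int × Int)
    (hs : List.Pairwise (fun a b => pvEvLT a b = true) pending) :
    ∀ (lo hi : Nat), lo ≤ hi → hi ≤ pending.length →
    (∀ i : Nat, i < lo → pvEvLT (pending.getD i (0,0,0)) ev = true) →
    (∀ i : Nat, hi ≤ i → i < pending.length → pvEvLT (pending.getD i (0,0,0)) ev = false) →
    (pvBsLoop pending ev lo hi ≤ pending.length ∧
     (∀ i : Nat, i < pvBsLoop pending ev lo hi → pvEvLT (pending.getD i (0,0,0)) ev = true) ∧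
     (∀ i : Nat, pvBsLoop pending ev lo hi ≤ i → i < pending.length →
        pvEvLT (pending.getD i (0,0,0)) ev = false)) := by
  suffices h : ∀ (fuel lo hi : Nat), hi - lo ≤ fuel → lo ≤ hi → hi ≤ pending.length →
      (∀ i : Nat, i < lo → pvEvLT (pending.getD i (0,0,0)) ev = true) →
      (∀ i : Nat, hi ≤ i → i < pending.length → pvEvLT (pending.getD i (0,0,0)) ev = false) →
      (pvBsLoop pending ev lo hi ≤ pending.length ∧
       (∀ i : Nat, i < pvBsLoop pending ev lo hi → pvEvLT (pending.getD i (0,0,0)) ev = true) ∧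
       (∀ i : Nat, pvBsLoop pending ev lo hi ≤ i → i < pending.length →
          pvEvLT (pending.getD i (0,0,0)) ev = false)) by
    intro lo hi h1 h2 h3 h4
    exact h (hi - lo) lo hi le_rfl h1 h2 h3 h4
  intro fuel
  induction fuel with
  | zero =>
    intro lo hi hf h1 h2 hbelow habove
    rw [pvBsLoop, dif_neg (by omega)]
    exact ⟨by omega, hbelow, fun i hi1 hi2 => habove i (by omega) hi2⟩
  | succ fuel ih =>
    intro lo hi hf h1 h2 hbelow habove
    by_cases hlt : lo < hi
    · rw [pvBsLoop, dif_pos hlt]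
      simp only []
      by_cases hprobe : pvEvLT (pending.getD ((lo + hi) / 2) (0,0,0)) ev = true
      · rw [if_pos hprobe]
        exact ih ((lo + hi) / 2 + 1) hi (by omega) (by omega) h2
          (fun i hi' => by
            rcases Nat.lt_or_ge i lo with h' | h'
            · exact hbelow i h'
            · rcases Nat.eq_or_lt_of_le (Nat.le_of_lt_succ hi') with rfl | hlt2
              · exact hprobe
              · exact pvEvLT_trans (pvPairwise_getD hs hlt2 (by omega)) hprobe)
          habove
      · rw [if_neg hprobe]
        rw [Bool.not_eq_true] at hprobe
        exact ih lo ((lo + hi) / 2) (by omega) (by omega) (by omega) hbelow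
          (fun i hi1 hi2 => by
            by_contra hc
            rw [Bool.not_eq_false] at hc
            rcases Nat.lt_or_ge i hi with h2' | h2'
            · rcases Nat.eq_or_lt_of_le hi1 with rfl | hmi
              · rw [hprobe] at hc; exact absurd hc (by simp)
              · have := pvEvLT_trans (pvPairwise_getD hs hmi (by omega)) hc
                rw [hprobe] at this; exact absurd this (by simp)
            · have := habove i h2' hi2
              rw [this] at hc; exact absurd hc (by simp))
    · rw [pvBsLoop, dif_neg hlt]
      exact ⟨by omega, hbelow, fun i hi1 hi2 => habove i (by omega) hi2⟩

lemma pvBsLoop_le (pending : List (Int × Int × Int)) (ev : Int × Int × Int) :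
    ∀ (fuel lo hi : Nat), hi - lo ≤ fuel → lo ≤ hi → pvBsLoop pending ev lo hi ≤ hi := by
  intro fuel
  induction fuel with
  | zero =>
    intro lo hi hf h1
    rw [pvBsLoop, dif_neg (by omega)]
    omega
  | succ fuel ih =>
    intro lo hi hf h1
    by_cases hlt : lo < hi
    · rw [pvBsLoop, dif_pos hlt]
      simp only []
      by_cases hprobe : pvEvLT (pending.getD ((lo + hi) / 2) (0,0,0)) ev = true
      · rw [if_pos hprobe]; exact ih _ _ (by omega) (by omega)
      · rw [if_neg hprobe]; exact le_trans (ih _ _ (by omega) (by omega)) (by omega)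
    · rw [pvBsLoop, dif_neg hlt]; omega

lemma pvInsertAsc_eq (pending : List (Int × Int × Int)) (ev : Int × Int × Int) :
    ∃ k : Nat, k ≤ pending.length ∧
      pvInsertAsc pending ev = pending.take k ++ ev :: pending.drop k := by
  refine ⟨pvBsLoop pending ev 0 pending.length, ?_, ?_⟩
  · exact pvBsLoop_le pending ev pending.length 0 pending.length le_rfl (by omega)
  · unfold pvInsertAsc
    exact PySem.List.insert_natCast pending _ ev
      (pvBsLoop_le pending ev pending.length 0 pending.length le_rfl (by omega))

lemma pvInsertAsc_perm (pending : List (Int × Int × Int)) (ev : Int × Int × Int) :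
    (pvInsertAsc pending ev).Perm (ev :: pending) := by
  obtain ⟨k, hk, heq⟩ := pvInsertAsc_eq pending ev
  rw [heq]
  have h1 : (pending.take k ++ ev :: pending.drop k).Perm
      (ev :: (pending.take k ++ pending.drop k)) := List.perm_middle
  rwa [List.take_append_drop] at h1

lemma pvInsertAsc_pairwise {pending : List (Int × Int × Int)} {ev : Int × Int × Int}
    (hs : List.Pairwise (fun a b => pvEvLT a b = true) pending) (hnin : ev ∉ pending) :
    List.Pairwise (fun a b => pvEvLT a b = true) (pvInsertAsc pending ev) := by
  have hspec := pvBsLoop_spec pending ev hs 0 pending.length (by omega) le_rfl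
    (by omega) (by omega)
  obtain ⟨hle, hbelow, habove⟩ := hspec
  set k := pvBsLoop pending ev 0 pending.length with hkdef
  have heq : pvInsertAsc pending ev = pending.take k ++ ev :: pending.drop k := by
    unfold pvInsertAsc
    exact PySem.List.insert_natCast pending _ ev hle
  -- every element of the suffix is strictly greater than ev
  have hgt : ∀ x ∈ pending.drop k, pvEvLT ev x = true := by
    intro x hx
    obtain ⟨i, hi, rfl⟩ := List.getElem_of_mem hx
    rw [List.length_drop] at hi
    rw [List.getElem_drop]
    have h1 : pvEvLT (pending.getD (k + i) (0,0,0)) ev = false := by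
      refine habove (k + i) (by omega) (by omega)
    have hne : pending[k + i]'(by omega) ≠ ev := by
      intro hcon
      exact hnin (hcon ▸ List.getElem_mem _)
    by_contra hc
    rw [Bool.not_eq_true] at hc
    rw [List.getD_eq_getElem _ _ (by omega)] at h1
    exact hne (pvEvLT_total h1 hc)
  have hlt : ∀ x ∈ pending.take k, pvEvLT x ev = true := by
    intro x hx
    obtain ⟨i, hi, rfl⟩ := List.getElem_of_mem hx
    rw [List.length_take] at hi
    rw [List.getElem_take]
    have := hbelow i (by omega)
    rwa [List.getD_eq_getElem _ _ (by omega)] at this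
  rw [heq]
  rw [List.pairwise_append]
  refine ⟨hs.sublist (List.take_sublist _ _), ?_, ?_⟩
  · rw [List.pairwise_cons]
    exact ⟨hgt, hs.sublist (List.drop_sublist _ _)⟩
  · intro x hx y hy
    rcases List.mem_cons.mp hy with rfl | hy'
    · exact hlt x hx
    · exact pvEvLT_trans (hlt x hx) (hgt y hy')

-- Section 3: zip-with-tail and splits --------------------------------------------

lemma pvMem_zip_tail {α : Type} {P : List α} {pr : α × α} :
    pr ∈ P.zip P.tail ↔ ∃ A B, P = A ++ pr.1 :: pr.2 :: B := by
  induction P with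
  | nil => simp
  | cons p t ih =>
    cases t with
    | nil =>
      simp only [List.tail_cons, List.zip_nil_right, List.not_mem_nil, false_iff, not_exists]
      intro A B h
      have := congrArg List.length h
      simp at this
      omega
    | cons q t' =>
      have hz : (p :: q :: t').zip (p :: q :: t').tail = (p, q) :: ((q :: t').zip t') := by
        simp
      rw [hz, List.mem_cons]
      constructor
      · rintro (h | h)
        · exact ⟨[], t', by simp [h]⟩
        · have h' : pr ∈ (q :: t').zip (q :: t').tail := by simpa using h
          obtain ⟨A, B, hAB⟩ := ih.mp h'
          exact ⟨p :: A, B, by simp [hAB]⟩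
      · rintro ⟨A, B, hAB⟩
        cases A with
        | nil =>
          simp only [List.nil_append, List.cons.injEq] at hAB
          obtain ⟨rfl, rfl, _⟩ := hAB
          left; rfl
        | cons a A' =>
          simp only [List.cons_append, List.cons.injEq] at hAB
          obtain ⟨rfl, hAB⟩ := hAB
          right
          have h' : pr ∈ (q :: t').zip (q :: t').tail := ih.mpr ⟨A', B, hAB⟩
          simpa using h'

lemma pvZip_tail_map {α β : Type} (f : α → β) (P : List α) :
    (P.map f).zip ((P.map f).tail) = (P.zip P.tail).map (fun pr => (f pr.1, f pr.2)) := by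
  rw [← List.map_tail, List.zip_map]
  rfl

-- Section 4: the running-minimum scan picks the first minimal gap ----------------

-- the fold step of pvScanMin, named
def pvScanStep (st : Option (Int × ((Int × Int) × (Int × Int))))
    (pr : (Int × Int) × (Int × Int)) : Option (Int × ((Int × Int) × (Int × Int))) :=
  match st with
  | none => some (pr.2.2 - pr.1.2, pr)
  | some (d, best) => if pr.2.2 - pr.1.2 < d then some (pr.2.2 - pr.1.2, pr) else some (d, best)

lemma pvScanMin_eq_foldl (ps : List ((Int × Int) × (Int × Int))) :
    pvScanMin ps = ps.foldl pvScanStep none := rfl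

lemma pvScanAux (ps : List ((Int × Int) × (Int × Int))) :
    ∀ (pr0 : (Int × Int) × (Int × Int)),
    ∃ C pr D, pr0 :: ps = C ++ pr :: D ∧
      ps.foldl pvScanStep (some (pvGap pr0, pr0)) = some (pvGap pr, pr) ∧
      (∀ c ∈ C, pvGap pr < pvGap c) ∧ (∀ d ∈ D, pvGap pr ≤ pvGap d) := by
  induction ps with
  | nil =>
    intro pr0
    exact ⟨[], pr0, [], rfl, rfl, by simp, by simp⟩
  | cons x rest ih =>
    intro pr0
    rw [List.foldl_cons]
    simp only [pvScanStep]
    by_cases hx : x.2.2 - x.1.2 < pvGap pr0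
    · rw [if_pos hx]
      obtain ⟨C', pr, D', hsplit, hfold, hC, hD⟩ := ih x
      have hprx : pvGap pr ≤ pvGap x := by
        cases C' with
        | nil =>
          simp only [List.nil_append, List.cons.injEq] at hsplit
          rw [hsplit.1]
        | cons c C'' =>
          simp only [List.cons_append, List.cons.injEq] at hsplit
          exact le_of_lt (hsplit.1 ▸ hC c (by simp))
      refine ⟨pr0 :: C', pr, D', by simp [← hsplit], by simpa [pvGap] using hfold, ?_, hD⟩
      intro c hc
      rcases List.mem_cons.mp hc with rfl | hc'
      · exact lt_of_le_of_lt hprx hx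
      · exact hC c hc'
    · rw [if_neg hx]
      obtain ⟨C', pr, D', hsplit, hfold, hC, hD⟩ := ih pr0
      cases C' with
      | nil =>
        simp only [List.nil_append, List.cons.injEq] at hsplit
        obtain ⟨h1, h2⟩ := hsplit
        refine ⟨[], pr, x :: D', by simp [h1, h2], hfold, by simp, ?_⟩
        intro d hd
        rcases List.mem_cons.mp hd with rfl | hd2
        · rw [← h1]; simpa [pvGap] using hx
        · exact hD d hd2
      | cons c C'' =>
        simp only [List.cons_append, List.cons.injEq] at hsplit
        obtain ⟨rfl, hsplit⟩ := hsplit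
        refine ⟨pr0 :: x :: C'', pr, D', by simp [hsplit], hfold, ?_, hD⟩
        intro c hc
        rcases List.mem_cons.mp hc with rfl | hc'
        · exact hC c (by simp)
        · rcases List.mem_cons.mp hc' with rfl | hc''
          · calc pvGap pr < pvGap pr0 := hC pr0 (by simp)
              _ ≤ pvGap c := by simpa [pvGap] using hx
          · exact hC c (by simp [hc''])

lemma pvScanMin_split (ps : List ((Int × Int) × (Int × Int))) (h : ps ≠ []) :
    ∃ C pr D, ps = C ++ pr :: D ∧ pvScanMin ps = some (pvGap pr, pr) ∧
      (∀ c ∈ C, pvGap pr < pvGap c) ∧ (∀ d ∈ D, pvGap pr ≤ pvGap d) := by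
  cases ps with
  | nil => exact absurd rfl h
  | cons x rest =>
    obtain ⟨C, pr, D, hsplit, hfold, hC, hD⟩ := pvScanAux rest x
    refine ⟨C, pr, D, hsplit, ?_, hC, hD⟩
    rw [pvScanMin_eq_foldl, List.foldl_cons]
    simpa [pvScanStep, pvGap] using hfold

-- Section 5: matching a decomposition of A ++ B against the junction ---------------

lemma pvSplitMatch {α : Type} {A B X Y : List α} {t u : α} (h : A ++ B = X ++ t :: u :: Y) :
    (∃ A2, A = X ++ t :: u :: A2 ∧ A2 ++ B = Y) ∨
    (A = X ++ [t] ∧ B = u :: Y) ∨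
    (∃ X1, X = A ++ X1 ∧ B = X1 ++ t :: u :: Y) := by
  induction A generalizing X with
  | nil => exact Or.inr (Or.inr ⟨X, by simp, by simpa using h⟩)
  | cons a A' ih =>
    cases X with
    | nil =>
      simp only [List.nil_append, List.cons_append, List.cons.injEq] at h ⊢
      obtain ⟨rfl, h⟩ := h
      cases A' with
      | nil => exact Or.inr (Or.inl ⟨by simp, by simpa using h⟩)
      | cons a2 A'' =>
        simp only [List.cons_append, List.cons.injEq] at h
        obtain ⟨rfl, h⟩ := h
        exact Or.inl ⟨A'', ⟨rfl, rfl⟩, h⟩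
    | cons x X' =>
      simp only [List.cons_append, List.cons.injEq] at h
      obtain ⟨rfl, h⟩ := h
      rcases ih h with ⟨A2, h1, h2⟩ | ⟨h1, h2⟩ | ⟨X1, h1, h2⟩
      · exact Or.inl ⟨A2, by simp [h1], h2⟩
      · exact Or.inr (Or.inl ⟨by simp [h1], h2⟩)
      · exact Or.inr (Or.inr ⟨X1, by simp [h1], h2⟩)

lemma pvSplitLast {α : Type} {A B X : List α} {t : α} (h : A ++ B = X ++ [t]) :
    (B = [] ∧ A = X ++ [t]) ∨ (∃ X1, X = A ++ X1 ∧ B = X1 ++ [t]) := by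
  induction A generalizing X with
  | nil => exact Or.inr ⟨X, by simp, by simpa using h⟩
  | cons a A' ih =>
    cases X with
    | nil =>
      simp only [List.nil_append, List.cons_append, List.cons.injEq] at h
      obtain ⟨rfl, h⟩ := h
      have := List.append_eq_nil_iff.mp h
      exact Or.inl ⟨this.2, by simp [this.1]⟩
    | cons x X' =>
      simp only [List.cons_append, List.cons.injEq] at h
      obtain ⟨rfl, h⟩ := h
      rcases ih h with ⟨h1, h2⟩ | ⟨X1, h1, h2⟩
      · exact Or.inl ⟨h1, by simp [h2]⟩
      · exact Or.inr ⟨X1, by simp [h1], h2⟩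

lemma pvSplitHead {α : Type} {A B Y : List α} {t : α} (h : A ++ B = t :: Y) :
    (A = [] ∧ B = t :: Y) ∨ (∃ A', A = t :: A' ∧ A' ++ B = Y) := by
  cases A with
  | nil => exact Or.inl ⟨rfl, by simpa using h⟩
  | cons a A' =>
    simp only [List.cons_append, List.cons.injEq] at h
    exact Or.inr ⟨A', by simp [h.1], h.2⟩

-- Section 6: pvPopValid ----------------------------------------------------------

lemma pvPopValid_spec (alive : List Bool) (nxt : List Int)
    (pending : List (Int × Int × Int)) (hex : ∃ e ∈ pending, pvValid alive nxt e = true) :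
    ∃ pre e rest, pending = pre ++ e :: rest ∧ (∀ x ∈ pre, pvValid alive nxt x = false) ∧
      pvValid alive nxt e = true ∧ pvPopValid alive nxt pending = some (e, rest) := by
  induction pending with
  | nil => simp at hex
  | cons e rest ih =>
    by_cases hv : pvValid alive nxt e = true
    · refine ⟨[], e, rest, rfl, by simp, hv, ?_⟩
      unfold pvValid at hv
      simp only [pvPopValid]
      rw [if_pos hv]
    · have hex' : ∃ x ∈ rest, pvValid alive nxt x = true := by
        obtain ⟨x, hx, hvx⟩ := hex
        rcases List.mem_cons.mp hx with rfl | hx'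
        · exact absurd hvx hv
        · exact ⟨x, hx', hvx⟩
      obtain ⟨pre, e', rest', heq, hpre, hve, hpop⟩ := ih hex'
      refine ⟨e :: pre, e', rest', by simp [heq], ?_, hve, ?_⟩
      · intro x hx
        rcases List.mem_cons.mp hx with rfl | hx'
        · simpa using hv
        · exact hpre x hx'
      · unfold pvValid at hv
        simp only [pvPopValid]
        rw [if_neg hv]
        exact hpop

-- Section 7: the sort of a mapped list -------------------------------------------

lemma pvInsertBy_map {α β : Type} (g : α → β) (before : β → β → Bool) (x : α)
    (acc : List α) :
    PySem.List.insertBy before (g x) (acc.map g) =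
      (PySem.List.insertBy (fun a b => before (g a) (g b)) x acc).map g := by
  induction acc with
  | nil => simp [PySem.List.insertBy]
  | cons y ys ih =>
    simp only [List.map_cons, PySem.List.insertBy]
    split_ifs with h
    · simp
    · simp [ih]

lemma pvSorted_map {α β κ : Type} [LT κ] [DecidableLT κ] (g : α → β) (key : β → κ)
    (xs : List α) :
    PySem.List.sorted (xs.map g) key = (PySem.List.sorted xs (fun x => key (g x))).map g := by
  unfold PySem.List.sorted
  simp only [if_neg (by simp : ¬ (false = true))]
  rw [List.foldl_map]
  suffices h : ∀ acc : List α,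
      xs.foldl (fun acc x => PySem.List.insertBy (fun a b => decide (key a < key b)) (g x) acc)
        (acc.map g) =
      (xs.foldl (fun acc x =>
        PySem.List.insertBy (fun a b => decide (key (g a) < key (g b))) x acc) acc).map g by
    simpa using h []
  induction xs with
  | nil => intro acc; rfl
  | cons x xs ih =>
    intro acc
    rw [List.foldl_cons, List.foldl_cons, pvInsertBy_map g _ x acc, ih]

-- Section 8: two-element sort ----------------------------------------------------

lemma pvSorted_pair (a b : Int) :
    PySem.List.sorted [a, b] (fun x => x) = if a < b then [a, b] else [b, a] := by
  by_cases h : b < a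
  · have h2 : ¬ a < b := by omega
    simp [PySem.List.sorted, PySem.List.insertBy, h, h2]
  · by_cases h2 : a < b
    · simp [PySem.List.sorted, PySem.List.insertBy, h, h2]
    · have : a = b := by omega
      subst this
      simp [PySem.List.sorted, PySem.List.insertBy]

-- Section 9: removal of the two matched entries ----------------------------------

-- getD after set
lemma pvGetD_set_ne {α : Type} (l : List α) (i j : Nat) (v d : α) (hne : i ≠ j) :
    (l.set i v).getD j d = l.getD j d := by
  simp [List.getD, hne]

lemma pvGetD_set_eq {α : Type} (l : List α) (i : Nat) (v d : α) (hi : i < l.length) :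
    (l.set i v).getD i d = v := by
  simp [List.getD, hi]

-- injectivity of pvPair on positions below n
lemma pvPair_inj (order xs : List Int) (n : Nat) (hol : order.length = n) (hnd : order.Nodup)
    {a b : Nat} (ha : a < n) (hb : b < n) (h : pvPair order xs a = pvPair order xs b) : a = b := by
  have h1 : order.getD a 0 = order.getD b 0 := congrArg Prod.fst h
  rw [List.getD_eq_getElem _ _ (by omega), List.getD_eq_getElem _ _ (by omega)] at h1
  exact (List.Nodup.getElem_inj_iff hnd).mp h1

lemma pvRemove_map (order xs : List Int) (n : Nat) (hol : order.length = n)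
    (hnd : order.Nodup) (X : List Nat) (t : Nat) (Y : List Nat)
    (hb : ∀ p ∈ X ++ t :: Y, p < n) (hne : ∀ a ∈ X, a ≠ t) :
    PySem.List.remove? ((X ++ t :: Y).map (pvPair order xs)) (pvPair order xs t) =
      some ((X ++ Y).map (pvPair order xs)) := by
  induction X with
  | nil => simp
  | cons a X' ih =>
    have hat : pvPair order xs a ≠ pvPair order xs t := by
      intro hcon
      exact hne a (by simp) (pvPair_inj order xs n hol hnd (hb a (by simp)) (hb t (by simp)) hcon)
    simp only [List.cons_append, List.map_cons]
    rw [PySem.List.remove?_cons_of_ne _ hat,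
      ih (fun p hp => hb p (by simp at hp ⊢; tauto)) (fun a' ha' => hne a' (by simp [ha']))]
    rfl

-- Section 10: one round preserves the invariant -----------------------------------

lemma pvMemHead {α : Type} {l : List α} {a : α} (h : l.head? = some a) : a ∈ l := by
  cases l with
  | nil => simp at h
  | cons x t => simp at h; simp [h]

lemma pvMemLast {α : Type} {l : List α} {a : α} (h : l.getLast? = some a) : a ∈ l := by
  obtain ⟨ys, rfl⟩ := List.getLast?_eq_some_iff.mp h
  simp

lemma pvValid_adj {n : Nat} {xs : List Int} {P : List Nat} {alive : List Bool} {nxt : List Int}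
    (hPb : ∀ p ∈ P, p < n)
    (halive : ∀ p : Nat, p < n → alive.getD p false = decide (p ∈ P))
    (hnxt1 : ∀ X t u Y, P = X ++ t :: u :: Y → nxt.getD t 0 = (u : Int))
    (X : List Nat) (t u : Nat) (Y : List Nat) (h : P = X ++ t :: u :: Y) :
    pvValid alive nxt (pvEv xs t u) = true := by
  have htP : t ∈ P := by rw [h]; simp
  have ht : alive.getD t false = true := by
    rw [halive t (hPb t htP)]; simp [htP]
  have hn : nxt.getD t 0 = (u : Int) := hnxt1 X t u Y h
  simp [pvValid, pvEv, PySem.List.pyGetD_natCast, -List.getD_eq_getElem?_getD, ht, hn]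

lemma pvInv_step (n : Nat) (xs : List Int) (A B : List Nat) (l r : Nat)
    (alive : List Bool) (nxt prv : List Int)
    (pending pre rest : List (Int × Int × Int))
    (hInv : pvInv n xs (A ++ l :: r :: B) alive nxt prv pending)
    (hpend : pending = pre ++ pvEv xs l r :: rest)
    (hpre : ∀ x ∈ pre, pvValid alive nxt x = false) :
    pvInv n xs (A ++ B)
      ((alive.set l false).set r false)
      (match A.getLast? with
       | none => nxt
       | some a => nxt.set a (nxt.getD r 0))
      (match B.head? with
       | none => prv
       | some b => prv.set b (prv.getD l 0))
      (match A.getLast?, B.head? with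
       | some a, some b => pvInsertAsc rest (pvEv xs a b)
       | _, _ => rest) := by
  obtain ⟨hPsort, hPb, halen, halive, hnlen, hplen, hnxt1, hnxt2, hprv1, hprv2,
    hps, hwf, hI7, hcomp⟩ := hInv
  have hsub : (A ++ B).Sublist (A ++ l :: r :: B) :=
    List.Sublist.append (List.Sublist.refl A)
      ((List.sublist_cons_self r B).trans (List.sublist_cons_self l (r :: B)))
  obtain ⟨pwA, pwT, hcross⟩ := List.pairwise_append.mp hPsort
  obtain ⟨hlT, pwRB⟩ := List.pairwise_cons.mp pwT
  obtain ⟨hrB, pwB⟩ := List.pairwise_cons.mp pwRB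
  have hAl : ∀ a ∈ A, a < l := fun a ha => hcross a ha l (by simp)
  have hlr : l < r := hlT r (by simp)
  have hln : l < n := hPb l (by simp)
  have hrn : r < n := hPb r (by simp)
  have hlAB : l ∉ A ++ B := by
    intro hm
    rcases List.mem_append.mp hm with h | h
    · exact absurd (hAl l h) (by omega)
    · exact absurd (hrB l h) (by omega)
  have hrAB : r ∉ A ++ B := by
    intro hm
    rcases List.mem_append.mp hm with h | h
    · exact absurd (hAl r h) (by omega)
    · exact absurd (hrB r h) (by omega)
  have hnl : nxt.getD l 0 = (r : Int) := hnxt1 A l r B rfl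
  have hnr : nxt.getD r 0 = (match B.head? with | none => (n : Int) | some b => (b : Int)) := by
    cases B with
    | nil => exact hnxt2 (A ++ [l]) r (by simp)
    | cons b B2 => exact hnxt1 (A ++ [l]) r b B2 (by simp)
  have hpl : prv.getD l 0 = (match A.getLast? with | none => -1 | some a => (a : Int)) := by
    rcases List.eq_nil_or_concat A with rfl | ⟨ys, a, hA⟩
    · exact hprv2 l (r :: B) rfl
    · have hA' : A = ys ++ [a] := by simpa [List.concat_eq_append] using hA
      rw [hA', List.getLast?_concat]
      exact hprv1 ys a l (r :: B) (by simp [hA'])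
  have hrest_sub : rest.Sublist pending := by
    rw [hpend]
    exact ((List.sublist_cons_self _ rest).trans (List.sublist_append_right pre _))
  have hrest_mem : ∀ e ∈ rest, e ∈ pending := fun e he => hrest_sub.mem he
  have hmem_rest_of_valid : ∀ e ∈ pending, pvValid alive nxt e = true → e ≠ pvEv xs l r →
      e ∈ rest := by
    intro e he hv hne
    rw [hpend] at he
    rcases List.mem_append.mp he with h | h
    · rw [hpre e h] at hv; exact absurd hv (by simp)
    · rcases List.mem_cons.mp h with h' | h'
      · exact absurd h' hne
      · exact h'
  -- the new event is absent from rest (no duplicate is ever inserted)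
  have hnew_notin : ∀ a b : Nat, A.getLast? = some a → B.head? = some b →
      pvEv xs a b ∉ rest := by
    intro a b ha hb hmem
    obtain ⟨ys, rfl⟩ := List.getLast?_eq_some_iff.mp ha
    have hbB : b ∈ B := pvMemHead hb
    have haP : a ∈ (ys ++ [a]) ++ l :: r :: B := by simp
    have h7 := hI7 (pvEv xs a b) (hrest_mem _ hmem) a rfl haP
    have hna : nxt.getD a 0 = (l : Int) := hnxt1 ys a l (r :: B) (by simp)
    rw [hna] at h7
    simp only [pvEv] at h7
    have : b ≤ l := by exact_mod_cast h7
    have := hrB b hbB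
    omega
  refine ⟨hPsort.sublist hsub, fun p hp => hPb p (hsub.subset hp), by simp [halen], ?_,
    ?_, ?_, ?_, ?_, ?_, ?_, ?_, ?_, ?_, ?_⟩
  -- alive
  · intro p hpn
    by_cases hpr : p = r
    · subst hpr
      rw [pvGetD_set_eq _ _ _ _ (by simp [halen]; omega)]
      simp [hrAB]
    · rw [pvGetD_set_ne _ _ _ _ _ (Ne.symm hpr)]
      by_cases hplq : p = l
      · subst hplq
        rw [pvGetD_set_eq _ _ _ _ (by omega)]
        simp [hlAB]
      · rw [pvGetD_set_ne _ _ _ _ _ (Ne.symm hplq), halive p hpn]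
        rw [decide_eq_decide]
        constructor
        · intro hm
          rcases List.mem_append.mp hm with h | h
          · exact List.mem_append.mpr (Or.inl h)
          · rcases List.mem_cons.mp h with h' | h'
            · exact absurd h' hplq
            · rcases List.mem_cons.mp h' with h'' | h''
              · exact absurd h'' hpr
              · exact List.mem_append.mpr (Or.inr h'')
        · intro hm
          rcases List.mem_append.mp hm with h | h
          · exact List.mem_append.mpr (Or.inl h)
          · exact List.mem_append.mpr (Or.inr (by simp [h]))
  -- nxt length
  · cases A.getLast? <;> simp [hnlen]
  -- prv length
  · cases B.head? <;> simp [hplen]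
  -- nxt adjacency
  · intro X t u Y hXY
    rcases pvSplitMatch hXY with ⟨A2, hA, _⟩ | ⟨hA, hB⟩ | ⟨X1, _, hB⟩
    · have hold : nxt.getD t 0 = (u : Int) := hnxt1 X t u (A2 ++ l :: r :: B) (by rw [hA]; simp)
      have hAne : A ≠ [] := by rw [hA]; simp
      obtain ⟨a, ha⟩ := Option.ne_none_iff_exists'.mp (mt List.getLast?_eq_none_iff.mp hAne)
      rw [ha]
      obtain ⟨ys, hys⟩ := List.getLast?_eq_some_iff.mp ha
      have hta : t ≠ a := by
        have hu_mem : u ∈ A := by rw [hA]; simp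
        have ht_lt_u : t < u := by
          have := pwA.sublist (hA ▸ (List.sublist_append_right X _))
          exact (List.pairwise_cons.mp this).1 u (by simp)
        have hua : u ≤ a := by
          have pwA' : (ys ++ [a]).Pairwise (· < ·) := by rw [← hys]; exact pwA
          obtain ⟨_, _, hc⟩ := List.pairwise_append.mp pwA'
          have hu_mem' : u ∈ ys ++ [a] := by rw [← hys]; exact hu_mem
          rcases List.mem_append.mp hu_mem' with h | h
          · exact le_of_lt (hc u h a (by simp))
          · simp at h; omega
        omega
      rw [pvGetD_set_ne _ _ _ _ _ (Ne.symm hta)]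
      exact hold
    · rw [hA, List.getLast?_concat]
      have htn : t < n := hPb t (by rw [hA]; simp)
      rw [pvGetD_set_eq _ _ _ _ (by omega), hnr, hB]
      rfl
    · have hold : nxt.getD t 0 = (u : Int) :=
        hnxt1 (A ++ l :: r :: X1) t u Y (by rw [hB]; simp)
      cases hA : A.getLast? with
      | none => exact hold
      | some a =>
        have haA : a ∈ A := pvMemLast hA
        have hta : t ≠ a := by
          have htB : t ∈ B := by rw [hB]; simp
          have := hAl a haA
          have := hrB t htB
          omega
        rw [pvGetD_set_ne _ _ _ _ _ (Ne.symm hta)]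
        exact hold
  -- nxt last
  · intro X t hXY
    rcases pvSplitLast hXY with ⟨hBnil, hA⟩ | ⟨X1, _, hB⟩
    · rw [hA, List.getLast?_concat]
      have htn : t < n := hPb t (by rw [hA]; simp)
      rw [pvGetD_set_eq _ _ _ _ (by omega), hnr, hBnil]
      rfl
    · have hold : nxt.getD t 0 = (n : Int) := hnxt2 (A ++ l :: r :: X1) t (by rw [hB]; simp)
      cases hA : A.getLast? with
      | none => exact hold
      | some a =>
        have haA : a ∈ A := pvMemLast hA
        have hta : t ≠ a := by
          have htB : t ∈ B := by rw [hB]; simp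
          have := hAl a haA
          have := hrB t htB
          omega
        rw [pvGetD_set_ne _ _ _ _ _ (Ne.symm hta)]
        exact hold
  -- prv adjacency
  · intro X t u Y hXY
    rcases pvSplitMatch hXY with ⟨A2, hA, _⟩ | ⟨hA, hB⟩ | ⟨X1, _, hB⟩
    · have hold : prv.getD u 0 = (t : Int) := hprv1 X t u (A2 ++ l :: r :: B) (by rw [hA]; simp)
      cases hBh : B.head? with
      | none => exact hold
      | some b =>
        have hbB : b ∈ B := pvMemHead hBh
        have hub : u ≠ b := by
          have huA : u ∈ A := by rw [hA]; simp
          have := hAl u huA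
          have := hrB b hbB
          omega
        rw [pvGetD_set_ne _ _ _ _ _ (Ne.symm hub)]
        exact hold
    · rw [hB]
      simp only [List.head?_cons]
      have hun : u < n := hPb u (by rw [hB]; simp)
      rw [pvGetD_set_eq _ _ _ _ (by omega), hpl, hA, List.getLast?_concat]
    · have hold : prv.getD u 0 = (t : Int) :=
        hprv1 (A ++ l :: r :: X1) t u Y (by rw [hB]; simp)
      cases hBh : B.head? with
      | none => exact hold
      | some b =>
        have hub : u ≠ b := by
          intro hcon
          subst hcon
          have hbP : (A ++ l :: r :: B).Pairwise (· < ·) := hPsort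
          have : List.Pairwise (· < ·) B := pwB
          have hsplit : B = X1 ++ t :: u :: Y := hB
          have hhd : B.head? = some u := hBh
          cases X1 with
          | nil =>
            simp only [List.nil_append] at hsplit
            rw [hsplit] at hhd
            simp at hhd
            have : t < u := by
              rw [hsplit] at pwB
              exact (List.pairwise_cons.mp pwB).1 u (by simp)
            omega
          | cons x X2 =>
            rw [hsplit] at hhd
            simp at hhd
            rw [hsplit] at pwB
            have : x < u := (List.pairwise_cons.mp pwB).1 u (by simp)
            omega
        rw [pvGetD_set_ne _ _ _ _ _ (Ne.symm hub)]
        exact hold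
  -- prv head
  · intro t Y hXY
    rcases pvSplitHead hXY with ⟨hA, hB⟩ | ⟨A', hA, _⟩
    · rw [hB]
      simp only [List.head?_cons]
      have htn : t < n := hPb t (by rw [hB]; simp)
      rw [pvGetD_set_eq _ _ _ _ (by omega), hpl, hA]
      rfl
    · have hold : prv.getD t 0 = -1 := hprv2 t (A' ++ l :: r :: B) (by rw [hA]; simp)
      cases hBh : B.head? with
      | none => exact hold
      | some b =>
        have hbB : b ∈ B := pvMemHead hBh
        have htb : t ≠ b := by
          have htA : t ∈ A := by rw [hA]; simp
          have := hAl t htA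
          have := hrB b hbB
          omega
        rw [pvGetD_set_ne _ _ _ _ _ (Ne.symm htb)]
        exact hold
  -- pending pairwise
  · have hrp : List.Pairwise (fun a b => pvEvLT a b = true) rest := hps.sublist hrest_sub
    cases hA : A.getLast? with
    | none => exact hrp
    | some a =>
      cases hBh : B.head? with
      | none => exact hrp
      | some b => exact pvInsertAsc_pairwise hrp (hnew_notin a b hA hBh)
  -- well-formedness
  · cases hA : A.getLast? with
    | none =>
      simp only []
      exact fun e he => hwf e (hrest_mem e he)
    | some a =>
      cases hBh : B.head? with
      | none =>
        simp only []
        exact fun e he => hwf e (hrest_mem e he)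
      | some b =>
        simp only []
        intro e he
        rcases List.mem_cons.mp ((pvInsertAsc_perm rest (pvEv xs a b)).mem_iff.mp he) with
          h | h
        · have haA : a ∈ A := pvMemLast hA
          have hbB : b ∈ B := pvMemHead hBh
          have h1 := hAl a haA
          have h2 := hrB b hbB
          exact ⟨a, b, h, by omega, hPb b (by simp [hbB])⟩
        · exact hwf e (hrest_mem e h)
  -- I7
  · have hcore : ∀ e ∈ rest, ∀ t : Nat, e.2.1 = (t : Int) → t ∈ A ++ B →
        e.2.2 ≤ (match A.getLast? with
          | none => nxt
          | some a => nxt.set a (nxt.getD r 0)).getD t 0 := by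
      intro e he t hcast htm
      have htP : t ∈ A ++ l :: r :: B := by
        rcases List.mem_append.mp htm with h | h
        · simp [h]
        · simp [h]
      have hold := hI7 e (hrest_mem e he) t hcast htP
      cases hA : A.getLast? with
      | none => exact hold
      | some a =>
        by_cases hta : t = a
        · subst hta
          obtain ⟨ys, hys⟩ := List.getLast?_eq_some_iff.mp hA
          have hna : nxt.getD t 0 = (l : Int) := hnxt1 ys t l (r :: B) (by rw [hys]; simp)
          have htn : t < n := hPb t htP
          rw [pvGetD_set_eq _ _ _ _ (by omega)]
          rw [hna] at hold
          rw [hnr]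
          cases hBh : B.head? with
          | none =>
            simp only []
            have : (l : Int) ≤ (n : Int) := by exact_mod_cast le_of_lt hln
            omega
          | some b =>
            simp only []
            have hbB : b ∈ B := pvMemHead hBh
            have h2 := hrB b hbB
            have : (l : Int) ≤ (b : Int) := by exact_mod_cast le_of_lt (by omega)
            omega
        · rw [pvGetD_set_ne _ _ _ _ _ (Ne.symm hta)]
          exact hold
    cases hA : A.getLast? with
    | none =>
      simp only []
      intro e he t hcast htm
      have := hcore e he t hcast htm
      rw [hA] at this
      exact this
    | some a =>
      cases hBh : B.head? with
      | none =>
        simp only []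
        intro e he t hcast htm
        have := hcore e he t hcast htm
        rw [hA] at this
        exact this
      | some b =>
        simp only []
        intro e he t hcast htm
        rcases List.mem_cons.mp ((pvInsertAsc_perm rest (pvEv xs a b)).mem_iff.mp he) with
          h | h
        · subst h
          have hta : t = a := by
            have : ((a : Nat) : Int) = (t : Int) := by
              simpa [pvEv] using hcast
            omega
          subst hta
          have htn : t < n := hPb t (by simp [pvMemLast hA])
          rw [pvGetD_set_eq _ _ _ _ (by omega), hnr, hBh]
          simp [pvEv]
        · have := hcore e h t hcast htm
          rw [hA] at this
          exact this
  -- completeness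
  · intro X t u Y hXY
    have hmain : pvEv xs t u ∈ rest ∨
        (A.getLast? = some t ∧ B.head? = some u) := by
      rcases pvSplitMatch hXY with ⟨A2, hA, _⟩ | ⟨hA, hB⟩ | ⟨X1, _, hB⟩
      · left
        have hPdec : A ++ l :: r :: B = X ++ t :: u :: (A2 ++ l :: r :: B) := by
          rw [hA]; simp
        have hm := hcomp X t u _ hPdec
        have hv := pvValid_adj (xs := xs) hPb halive hnxt1 X t u _ hPdec
        refine hmem_rest_of_valid _ hm hv ?_
        intro hcon
        have : (t : Int) = (l : Int) := by
          have := congrArg (fun e => e.2.1) hcon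
          simpa [pvEv] using this
        have htl : t = l := by omega
        have htA : t ∈ A := by rw [hA]; simp
        have := hAl t htA
        omega
      · right
        exact ⟨by rw [hA, List.getLast?_concat], by rw [hB]; rfl⟩
      · left
        have hPdec : A ++ l :: r :: B = (A ++ l :: r :: X1) ++ t :: u :: Y := by
          rw [hB]; simp
        have hm := hcomp _ t u _ hPdec
        have hv := pvValid_adj (xs := xs) hPb halive hnxt1 _ t u _ hPdec
        refine hmem_rest_of_valid _ hm hv ?_
        intro hcon
        have : (t : Int) = (l : Int) := by
          have := congrArg (fun e => e.2.1) hcon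
          simpa [pvEv] using this
        have htl : t = l := by omega
        have htB : t ∈ B := by rw [hB]; simp
        have := hrB t htB
        omega
    rcases hmain with h | ⟨hA, hBh⟩
    · cases hA : A.getLast? with
      | none => simpa only [] using h
      | some a =>
        cases hBh : B.head? with
        | none => simpa only [] using h
        | some b =>
          simp only []
          exact (pvInsertAsc_perm rest (pvEv xs a b)).mem_iff.mpr (by simp [h])
    · rw [hA, hBh]
      simp only []
      exact (pvInsertAsc_perm rest (pvEv xs t u)).mem_iff.mpr (by simp)

-- Section 10: the bisimulation ---------------------------------------------------

lemma pvZip_pairwise_fst {P : List Nat} (hs : P.Pairwise (· < ·)) :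
    (P.zip P.tail).Pairwise (fun a b => a.1 < b.1) := by
  rw [List.pairwise_iff_getElem] at hs ⊢
  intro i j hi hj hij
  have hZ : (P.zip P.tail).length = min P.length P.tail.length := List.length_zip
  rw [List.getElem_zip, List.getElem_zip]
  exact hs i j (by simp at hZ hi hj ⊢; omega) (by simp at hZ hi hj ⊢; omega) hij

lemma pvStep (n : Nat) (order xs : List Int) (hol : order.length = n) (hxl : xs.length = n)
    (hnd : order.Nodup) (k c fuel : Nat) (hc : c < 2)
    (P : List Nat) (alive : List Bool) (nxt prv : List Int)
    (pending : List (Int × Int × Int)) (ms : List (List Int))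
    (hInv : pvInv n xs P alive nxt prv pending)
    (hlen : P.length = 2 * (k + 1) + c) (hfuel : P.length ≤ fuel + 1)
    (IH : ∀ (fuel : Nat) (P : List Nat) (alive : List Bool) (nxt prv : List Int)
      (pending : List (Int × Int × Int)) (ms : List (List Int)),
      pvInv n xs P alive nxt prv pending → P.length = 2 * k + c → P.length ≤ fuel →
      pvLoopA fuel (P.map (pvPair order xs)) ms = pvLoopB n order xs k alive nxt prv pending ms) :
    pvLoopA (fuel + 1) (P.map (pvPair order xs)) ms =
      pvLoopB n order xs (k + 1) alive nxt prv pending ms := by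
  have hInv0 := hInv
  obtain ⟨hPsort, hPb, halen, halive, hnlen, hplen, hnxt1, hnxt2, hprv1, hprv2,
    hps, hwf, hI7, hcomp⟩ := hInv
  -- the scan over adjacent pairs picks the first minimal-gap pair
  have hq2 : 2 ≤ (P.map (pvPair order xs)).length := by
    rw [List.length_map]; omega
  have hZlen : (P.zip P.tail).length = P.length - 1 := by
    rw [List.length_zip]; simp
  have hZne : ((P.zip P.tail).map
      (fun pr => (pvPair order xs pr.1, pvPair order xs pr.2))) ≠ [] := by
    intro hcon
    have := congrArg List.length hcon
    simp [hZlen] at this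
    omega
  obtain ⟨C, pr, D, hsplitM, hscan, hC, hD⟩ := pvScanMin_split _ hZne
  obtain ⟨C0, rest0, hZ1, hC0, hrest0⟩ := List.append_eq_map_iff.mp hsplitM.symm
  obtain ⟨pr0, D0, hrest0', hpr0, hD0⟩ := List.map_eq_cons_iff.mp hrest0
  obtain ⟨A, B, hP⟩ := pvMem_zip_tail.mp (by
    rw [hZ1, hrest0']
    exact List.mem_append.mpr (Or.inr (by simp)) : pr0 ∈ P.zip P.tail)
  set lN := pr0.1 with hlN
  set rN := pr0.2 with hrN
  have hZsplit : P.zip P.tail = C0 ++ pr0 :: D0 := by rw [hZ1, hrest0']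
  -- basic order facts
  obtain ⟨pwA, pwT, hcross⟩ := List.pairwise_append.mp (hP ▸ hPsort)
  obtain ⟨hlT, pwRB⟩ := List.pairwise_cons.mp pwT
  obtain ⟨hrB, pwB⟩ := List.pairwise_cons.mp pwRB
  have hlr : lN < rN := hlT rN (by simp)
  have hrn : rN < n := hPb rN (by rw [hP]; simp)
  have hln : lN < n := by omega
  -- gap of a mapped pair
  have hgap : ∀ x : Nat × Nat, pvGap (pvPair order xs x.1, pvPair order xs x.2) =
      xs.getD x.2 0 - xs.getD x.1 0 := by
    intro x; rfl
  -- the popped event is exactly the event of the chosen pair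
  have hevmem : pvEv xs lN rN ∈ pending := hcomp A lN rN B hP
  have hv : pvValid alive nxt (pvEv xs lN rN) = true :=
    pvValid_adj (xs := xs) hPb halive hnxt1 A lN rN B hP
  obtain ⟨pre, e0, rest, hpendEq, hpre, hve0, hpop⟩ :=
    pvPopValid_spec alive nxt pending ⟨pvEv xs lN rN, hevmem, hv⟩
  have he0mem : e0 ∈ pending := by rw [hpendEq]; simp
  obtain ⟨l0, r0, he0, hl0r0, hr0n⟩ := hwf e0 he0mem
  have hl0n : l0 < n := by omega
  -- validity of e0 gives that (l0, r0) is an adjacency of P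
  have hval : alive.getD l0 false = true ∧ nxt.getD l0 0 = (r0 : Int) := by
    rw [he0] at hve0
    unfold pvValid at hve0
    simp only [pvEv, PySem.List.pyGetD_natCast, Bool.and_eq_true, beq_iff_eq] at hve0
    exact hve0
  have hl0P : l0 ∈ P := by
    have := hval.1
    rw [halive l0 hl0n] at this
    simpa using this
  obtain ⟨X, Y, hXY⟩ := List.mem_iff_append.mp hl0P
  have hadj0 : ∃ Y2, P = X ++ l0 :: r0 :: Y2 := by
    cases Y with
    | nil =>
      have := hnxt2 X l0 hXY
      rw [hval.2] at this
      have : r0 = n := by exact_mod_cast this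
      omega
    | cons u Y2 =>
      have := hnxt1 X l0 u Y2 hXY
      rw [hval.2] at this
      have : u = r0 := by exact_mod_cast this.symm
      exact ⟨Y2, by rw [hXY, this]⟩
  obtain ⟨Y2, hadj⟩ := hadj0
  have he0ev : e0 = pvEv xs lN rN := by
    by_contra hne
    -- e0 comes no later than the chosen event, so evLT e0 (pvEv xs lN rN)
    have hevrest : pvEv xs lN rN ∈ rest := by
      rw [hpendEq] at hevmem
      rcases List.mem_append.mp hevmem with h | h
      · rw [hpre _ h] at hv; exact absurd hv (by simp)
      · rcases List.mem_cons.mp h with h' | h'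
        · exact absurd h'.symm hne
        · exact h'
    have hlt1 : pvEvLT e0 (pvEv xs lN rN) = true := by
      rw [hpendEq] at hps
      obtain ⟨_, hp2, _⟩ := List.pairwise_append.mp hps
      exact (List.pairwise_cons.mp hp2).1 _ hevrest
    -- but the chosen event is minimal among adjacency events
    have hpairZ : (l0, r0) ∈ P.zip P.tail := pvMem_zip_tail.mpr ⟨X, Y2, by simpa using hadj⟩
    rw [hZsplit] at hpairZ
    have hne' : (l0, r0) ≠ pr0 := by
      intro hcon
      apply hne
      have h1 : lN = l0 := by rw [hlN, ← hcon]
      have h2 : rN = r0 := by rw [hrN, ← hcon]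
      rw [he0, h1, h2]
    have hprg : pvGap pr = xs.getD rN 0 - xs.getD lN 0 := by
      rw [← hpr0]
      exact hgap pr0
    have hlt2 : pvEvLT (pvEv xs lN rN) e0 = true := by
      rcases List.mem_append.mp hpairZ with h | h
      · -- strictly earlier pairs have strictly larger gaps
        have hmemC : (pvPair order xs l0, pvPair order xs r0) ∈ C := by
          rw [← hC0]
          exact List.mem_map.mpr ⟨(l0, r0), h, rfl⟩
        have hgapC : pvGap pr < xs.getD r0 0 - xs.getD l0 0 := by
          simpa [hgap] using hC _ hmemC
        rw [he0]
        simp only [pvEv, pvEvLT, Bool.or_eq_true, Bool.and_eq_true, decide_eq_true_eq,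
          beq_iff_eq]
        rw [hprg] at hgapC
        left; omega
      · rcases List.mem_cons.mp h with h' | h'
        · exact absurd h' hne'
        · -- later pairs: gap ≥, and left endpoint strictly larger
          have hgapD : pvGap pr ≤ xs.getD r0 0 - xs.getD l0 0 := by
            have hmemD : (pvPair order xs l0, pvPair order xs r0) ∈ D := by
              rw [← hD0]
              exact List.mem_map.mpr ⟨(l0, r0), h', rfl⟩
            simpa [hgap] using hD _ hmemD
          have hpos : lN < l0 := by
            have hpw := pvZip_pairwise_fst hPsort
            rw [hZsplit] at hpw
            obtain ⟨_, hp2, _⟩ := List.pairwise_append.mp hpw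
            exact (List.pairwise_cons.mp hp2).1 _ h'
          rw [he0]
          simp only [pvEv, pvEvLT, Bool.or_eq_true, Bool.and_eq_true, decide_eq_true_eq,
            beq_iff_eq]
          rw [hprg] at hgapD
          rcases lt_or_eq_of_le hgapD with h2 | h2
          · left; omega
          · right
            refine ⟨by omega, Or.inl (by exact_mod_cast hpos)⟩
    exact pvEvLT_asymm hlt1 hlt2
  rw [he0ev] at hpop hpendEq
  -- unfold one round of A's loop
  have hqzip : (P.map (pvPair order xs)).zip
      (PySem.List.slice (P.map (pvPair order xs)) (some 1) none) =
      (P.zip P.tail).map (fun pr => (pvPair order xs pr.1, pvPair order xs pr.2)) := by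
    rw [PySem.List.slice_from_one, pvZip_tail_map]
  simp only [pvLoopA, if_pos hq2, hqzip, hscan]
  rw [← hpr0]
  simp only []
  -- the two removals delete exactly the two matched entries
  have hbP : ∀ p ∈ A ++ lN :: rN :: B, p < n := by rw [← hP]; exact hPb
  have hrm1 : PySem.List.remove? (P.map (pvPair order xs)) (pvPair order xs lN) =
      some ((A ++ rN :: B).map (pvPair order xs)) := by
    rw [hP]
    exact pvRemove_map order xs n hol hnd A lN (rN :: B) hbP
      (fun a ha => by have := hcross a ha lN (by simp); omega)
  have hrm2 : PySem.List.remove? ((A ++ rN :: B).map (pvPair order xs)) (pvPair order xs rN) =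
      some ((A ++ B).map (pvPair order xs)) := by
    refine pvRemove_map order xs n hol hnd A rN B
      (fun p hp => hbP p (by simp at hp ⊢; tauto))
      (fun a ha => by have := hcross a ha rN (by simp); omega)
  simp only [hrm1, Option.getD_some, hrm2, pvSorted_pair]
  rw [show (pvPair order xs lN).1 = order.getD lN 0 from rfl,
    show (pvPair order xs rN).1 = order.getD rN 0 from rfl]
  -- unfold one round of B's loop
  simp only [pvLoopB, hpop, pvEv, PySem.List.pyGetD_natCast, PySem.List.pySetD_natCast]
  -- values read from the linked list
  have hpval : prv.getD lN 0 = (match A.getLast? with | none => -1 | some a => (a : Int)) := by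
    rcases List.eq_nil_or_concat A with rfl | ⟨ys, a, hA⟩
    · exact hprv2 lN (rN :: B) hP
    · have hA' : A = ys ++ [a] := by simpa [List.concat_eq_append] using hA
      rw [hA', List.getLast?_concat]
      exact hprv1 ys a lN (rN :: B) (by rw [hP, hA']; simp)
  have hqval : nxt.getD rN 0 = (match B.head? with | none => (n : Int) | some b => (b : Int)) := by
    cases B with
    | nil => exact hnxt2 (A ++ [lN]) rN (by rw [hP]; simp)
    | cons b B2 => exact hnxt1 (A ++ [lN]) rN b B2 (by rw [hP]; simp)
  have hstep := pvInv_step n xs A B lN rN alive nxt prv pending pre rest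
    (by rw [← hP]; exact hInv0) hpendEq hpre
  have hlenP : P.length = A.length + 2 + B.length := by rw [hP]; simp; omega
  have hlen' : (A ++ B).length = 2 * k + c := by simp [List.length_append]; omega
  have hfuel' : (A ++ B).length ≤ fuel := by simp [List.length_append]; omega
  rw [hpval, hqval]
  rcases List.eq_nil_or_concat A with rfl | ⟨ys, a, hA⟩
  · cases B with
    | nil =>
      simp only [List.getLast?_nil, List.head?_nil] at hstep ⊢
      rw [if_neg (show ¬ (0:Int) ≤ -1 by norm_num),
        if_neg (show ¬ (n:Int) < (n:Int) by omega),
        if_neg (show ¬ ((0:Int) ≤ -1 ∧ (n:Int) < (n:Int)) by norm_num)]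
      exact IH fuel ([] ++ []) _ _ _ _ (ms ++ [_]) hstep hlen' hfuel'
    | cons b B2 =>
      simp only [List.getLast?_nil, List.head?_cons] at hstep ⊢
      simp only [List.getLast?_nil] at hpval
      rw [hpval] at hstep
      have hbn : b < n := hbP b (by simp)
      rw [if_neg (show ¬ (0:Int) ≤ -1 by norm_num),
        if_pos (show (b:Int) < (n:Int) by exact_mod_cast hbn),
        if_neg (show ¬ ((0:Int) ≤ -1 ∧ (b:Int) < (n:Int)) by norm_num)]
      simp only [PySem.List.pySetD_natCast]
      exact IH fuel ([] ++ b :: B2) _ _ _ _ (ms ++ [_]) hstep hlen' hfuel'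
  · have hA' : A = ys ++ [a] := by simpa [List.concat_eq_append] using hA
    have han : a < n := hbP a (by rw [hA']; simp)
    cases B with
    | nil =>
      rw [hA'] at hstep ⊢
      simp only [List.getLast?_concat, List.head?_nil] at hstep ⊢
      simp only [List.head?_nil] at hqval
      rw [hqval] at hstep
      rw [if_pos (show (0:Int) ≤ (a:Int) by positivity),
        if_neg (show ¬ (n:Int) < (n:Int) by omega),
        if_neg (show ¬ ((0:Int) ≤ (a:Int) ∧ (n:Int) < (n:Int)) by simp)]
      simp only [PySem.List.pySetD_natCast] at hstep ⊢
      rw [hA'] at hlen' hfuel'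
      exact IH fuel ((ys ++ [a]) ++ []) _ _ _ _ (ms ++ [_]) hstep hlen' hfuel'
    | cons b B2 =>
      rw [hA'] at hstep ⊢
      simp only [List.getLast?_concat, List.head?_cons] at hstep ⊢
      rw [hA'] at hpval
      simp only [List.getLast?_concat] at hpval
      simp only [List.head?_cons] at hqval
      rw [hpval, hqval] at hstep
      have hbn : b < n := hbP b (by simp)
      rw [if_pos (show (0:Int) ≤ (a:Int) by positivity),
        if_pos (show (b:Int) < (n:Int) by exact_mod_cast hbn),
        if_pos (show (0:Int) ≤ (a:Int) ∧ (b:Int) < (n:Int) from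
          ⟨by positivity, by exact_mod_cast hbn⟩)]
      simp only [PySem.List.pySetD_natCast, pvEv,
        PySem.List.pyGetD_natCast] at hstep ⊢
      rw [hA'] at hlen' hfuel'
      exact IH fuel ((ys ++ [a]) ++ b :: B2) _ _ _ _ (ms ++ [_]) hstep hlen' hfuel'

lemma pvBisim (n : Nat) (order xs : List Int) (hol : order.length = n) (hxl : xs.length = n)
    (hnd : order.Nodup) (k : Nat) :
    ∀ (c : Nat), c < 2 → ∀ (fuel : Nat) (P : List Nat) (alive : List Bool) (nxt prv : List Int)
      (pending : List (Int × Int × Int)) (ms : List (List Int)),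
    pvInv n xs P alive nxt prv pending → P.length = 2 * k + c → P.length ≤ fuel →
    pvLoopA fuel (P.map (pvPair order xs)) ms = pvLoopB n order xs k alive nxt prv pending ms := by
  induction k with
  | zero =>
    intro c hc fuel P alive nxt prv pending ms _ hlen _
    have h2 : ¬ 2 ≤ (P.map (pvPair order xs)).length := by
      rw [List.length_map]; omega
    cases fuel with
    | zero => simp [pvLoopA, pvLoopB]
    | succ f =>
      simp only [pvLoopA, pvLoopB]
      rw [if_neg h2]
  | succ k ih =>
    intro c hc fuel P alive nxt prv pending ms hInv hlen hfuel
    cases fuel with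
    | zero => omega
    | succ f =>
      exact pvStep n order xs hol hxl hnd k c f hc P alive nxt prv pending ms hInv hlen hfuel
        (fun fuel P alive nxt prv pending ms hI hl hf => ih c hc fuel P alive nxt prv pending ms hI hl hf)

-- Section 11: the initial state --------------------------------------------------

lemma pvBuild (xs : List Int) (m : Nat) :
    List.Pairwise (fun a b => pvEvLT a b = true)
      ((PySem.List.pyRange 0 (m : Int) 1).foldl
        (fun pend i => pvInsertAsc pend
          (PySem.List.pyGetD xs (i + 1) 0 - PySem.List.pyGetD xs i 0, i, i + 1)) []) ∧
    (∀ e, e ∈ ((PySem.List.pyRange 0 (m : Int) 1).foldl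
        (fun pend i => pvInsertAsc pend
          (PySem.List.pyGetD xs (i + 1) 0 - PySem.List.pyGetD xs i 0, i, i + 1)) []) ↔
      ∃ i : Nat, i < m ∧ e = pvEv xs i (i + 1)) := by
  induction m with
  | zero =>
    have h0 : PySem.List.pyRange 0 ((0 : Nat) : Int) 1 = [] :=
      PySem.List.pyRange_one_eq_nil (by omega)
    rw [h0]
    exact ⟨List.Pairwise.nil, by simp⟩
  | succ m ih =>
    obtain ⟨ihp, ihm⟩ := ih
    have hsplit : PySem.List.pyRange 0 ((m + 1 : Nat) : Int) 1 =
        PySem.List.pyRange 0 (m : Int) 1 ++ [(m : Int)] := by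
      have hc : ((m + 1 : Nat) : Int) = (m : Int) + 1 := by omega
      rw [hc, PySem.List.pyRange_one_succ_right (by omega)]
    rw [hsplit, List.foldl_append, List.foldl_cons, List.foldl_nil]
    have hev : (PySem.List.pyGetD xs ((m : Int) + 1) 0 - PySem.List.pyGetD xs (m : Int) 0,
        (m : Int), (m : Int) + 1) = pvEv xs m (m + 1) := by
      have hc2 : ((m : Int) + 1) = ((m + 1 : Nat) : Int) := by omega
      simp only [pvEv, hc2, PySem.List.pyGetD_natCast]
    rw [hev]
    have hnin : pvEv xs m (m + 1) ∉ (PySem.List.pyRange 0 (m : Int) 1).foldl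
        (fun pend i => pvInsertAsc pend
          (PySem.List.pyGetD xs (i + 1) 0 - PySem.List.pyGetD xs i 0, i, i + 1)) [] := by
      intro hmem
      obtain ⟨i, him, hei⟩ := (ihm _).mp hmem
      have hmi := congrArg (fun e => e.2.1) hei
      simp only [pvEv] at hmi
      omega
    refine ⟨pvInsertAsc_pairwise ihp hnin, ?_⟩
    intro e
    rw [(pvInsertAsc_perm _ _).mem_iff, List.mem_cons, ihm e]
    constructor
    · rintro (rfl | ⟨i, hi, rfl⟩)
      · exact ⟨m, by omega, rfl⟩
      · exact ⟨i, by omega, rfl⟩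
    · rintro ⟨i, hi, rfl⟩
      by_cases him : i = m
      · subst him; left; rfl
      · right; exact ⟨i, by omega, rfl⟩

lemma pvMain (xp : List Int) : opponentMatching xp = opponentMatching_alt xp := by
  unfold opponentMatching opponentMatching_alt
  simp only []
  set n := xp.length with hn
  set key := fun i : Int => PySem.List.pyGetD xp i 0 with hkey
  set order := PySem.List.sorted (PySem.List.pyRange 0 (n : Int) 1) key with horder
  set xs := order.map key with hxs
  -- lengths and distinctness
  have holen : order.length = n := by
    rw [horder, PySem.List.length_sorted, PySem.List.length_pyRange_one]
    omega
  have hxlen : xs.length = n := by rw [hxs, List.length_map, holen]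
  have hnd : order.Nodup := by
    have hperm : (PySem.List.sorted (PySem.List.pyRange 0 (n : Int) 1) key).Perm
        (PySem.List.pyRange 0 (n : Int) 1) := PySem.List.sorted_perm _ _ _
    rw [horder]
    exact hperm.nodup_iff.mpr (PySem.List.nodup_pyRange_one _ _)
  -- the sorted queue of A is the sorted position list mapped through pvPair
  have hqueue : PySem.List.sorted (PySem.List.enumerate xp) (fun x => x.2) =
      (List.range n).map (pvPair order xs) := by
    rw [PySem.List.enumerate_eq_map_pyRange xp 0, PySem.List.len_eq, ← hn]
    rw [pvSorted_map (fun j => (j, PySem.List.pyGetD xp j 0)) (fun x => x.2)]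
    have hkeyeq : (fun x : Int => (x, PySem.List.pyGetD xp x 0).2) = key := by
      funext x; rfl
    rw [hkeyeq, ← horder]
    apply List.ext_getElem
    · simp [holen]
    · intro i h1 h2
      simp only [List.getElem_map, List.getElem_range]
      simp only [List.length_map, holen] at h1
      simp only [pvPair]
      rw [List.getD_eq_getElem order 0 (by omega), List.getD_eq_getElem xs 0 (by omega)]
      have h4 : xs[i]'(by omega) = key (order[i]'(by omega)) := by
        simp only [hxs, List.getElem_map]
      rw [h4]
  -- the initial state satisfies the invariant
  have hInv0 : pvInv n xs (List.range n) (List.replicate n true)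
      (PySem.List.pyRange 1 ((n : Int) + 1) 1) (PySem.List.pyRange (-1) ((n : Int) - 1) 1)
      ((PySem.List.pyRange 0 ((n : Int) - 1) 1).foldl
        (fun pend i => pvInsertAsc pend
          (PySem.List.pyGetD xs (i + 1) 0 - PySem.List.pyGetD xs i 0, i, i + 1)) []) := by
    have hrange : PySem.List.pyRange 0 ((n : Int) - 1) 1 =
        PySem.List.pyRange 0 ((n - 1 : Nat) : Int) 1 := by
      cases n with
      | zero =>
        rw [PySem.List.pyRange_one_eq_nil (by omega), PySem.List.pyRange_one_eq_nil (by omega)]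
      | succ m => push_cast; ring_nf
    obtain ⟨hbp, hbm⟩ := pvBuild xs (n - 1)
    rw [hrange]
    -- decompositions of range n are consecutive indices
    have hdec : ∀ (X : List Nat) (t : Nat) (Z : List Nat), List.range n = X ++ t :: Z →
        t = X.length ∧ X.length + 1 + Z.length = n := by
      intro X t Z h
      have hlen := congrArg List.length h
      simp at hlen
      have h2 : (List.range n)[X.length]? = some t := by
        rw [h, List.getElem?_append_right (le_refl _)]
        simp
      rw [List.getElem?_range (by omega)] at h2
      exact ⟨(Option.some.inj h2).symm, by omega⟩
    refine ⟨List.pairwise_lt_range, fun p hp => List.mem_range.mp hp, by simp, ?_,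
      by rw [PySem.List.length_pyRange_one]; omega,
      by rw [PySem.List.length_pyRange_one]; omega, ?_, ?_, ?_, ?_, hbp, ?_, ?_, ?_⟩
    · intro p hp
      rw [List.getD_eq_getElem _ _ (by simp; omega), List.getElem_replicate]
      simp [List.mem_range, hp]
    · -- nxt adjacency
      intro X t u Y h
      obtain ⟨ht, hcnt⟩ := hdec X t (u :: Y) h
      have hu : u = t + 1 := by
        have h2 : List.range n = (X ++ [t]) ++ u :: Y := by rw [h]; simp
        obtain ⟨hu', _⟩ := hdec (X ++ [t]) u Y h2
        simp at hu'
        omega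
      rw [List.getD_eq_getElem _ _ (by rw [PySem.List.length_pyRange_one]; simp at hcnt ⊢; omega)]
      rw [PySem.List.getElem_pyRange_one]
      omega
    · -- nxt at the last element
      intro X t h
      obtain ⟨ht, hcnt⟩ := hdec X t [] h
      simp only [List.length_nil] at hcnt
      rw [List.getD_eq_getElem _ _ (by rw [PySem.List.length_pyRange_one]; omega)]
      rw [PySem.List.getElem_pyRange_one]
      omega
    · -- prv adjacency
      intro X t u Y h
      obtain ⟨ht, hcnt⟩ := hdec X t (u :: Y) h
      have hu : u = t + 1 := by
        have h2 : List.range n = (X ++ [t]) ++ u :: Y := by rw [h]; simp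
        obtain ⟨hu', _⟩ := hdec (X ++ [t]) u Y h2
        simp at hu'
        omega
      rw [List.getD_eq_getElem _ _ (by rw [PySem.List.length_pyRange_one]; simp at hcnt ⊢; omega)]
      rw [PySem.List.getElem_pyRange_one]
      omega
    · -- prv at the head
      intro t Y h
      obtain ⟨ht, hcnt⟩ := hdec [] t Y (by simpa using h)
      simp only [List.length_nil] at ht hcnt
      rw [List.getD_eq_getElem _ _ (by rw [PySem.List.length_pyRange_one]; omega)]
      rw [PySem.List.getElem_pyRange_one]
      omega
    · -- well-formedness of the built events
      intro e he
      obtain ⟨i, hi, rfl⟩ := (hbm e).mp he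
      exact ⟨i, i + 1, rfl, by omega, by omega⟩
    · -- I7 for the built events
      intro e he t hcast htm
      obtain ⟨i, hi, rfl⟩ := (hbm e).mp he
      have hit : i = t := by
        have : (i : Int) = (t : Int) := by simpa [pvEv] using hcast
        omega
      subst hit
      rw [List.getD_eq_getElem _ _ (by rw [PySem.List.length_pyRange_one]; simp; omega)]
      rw [PySem.List.getElem_pyRange_one]
      simp only [pvEv]
      omega
    · -- completeness of the built events
      intro A l r B h
      obtain ⟨hl, hcnt⟩ := hdec A l (r :: B) h
      have hr : r = l + 1 := by
        have h2 : List.range n = (A ++ [l]) ++ r :: B := by rw [h]; simp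
        obtain ⟨hr', _⟩ := hdec (A ++ [l]) r B h2
        simp at hr'
        omega
      rw [hr]
      exact (hbm _).mpr ⟨l, by simp at hcnt; omega, rfl⟩
  -- run the bisimulation from the initial state
  rw [hqueue]
  have hql : ((List.range n).map (pvPair order xs)).length = n := by simp
  rw [hql]
  exact pvBisim n order xs holen hxlen hnd (n / 2) (n % 2) (by omega) n (List.range n)
    _ _ _ _ [] hInv0 (by simp; omega) (by simp)
-- ===== VERDICT (by name: the statement is the Claim_ definition above) =====
theorem opponentMatching_spec : Claim_equal_opponentMatching := by
  intro xp _
  unfold Spec_opponentMatching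
  exact pvMain xp
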